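-- pv_equiv track=rewrite | github.com/MarcoTancredi/doneapp | tools/apply_changes.py | find_context_in_file
-- ===== SOURCE A (Python) =====
-- def normalize_context_lines(lines):
--     """
--     TOO/APL/APLCC - Normalize context lines by removing blank lines
--     Args:
--         lines (list): List of context lines
--     Returns:
--         list: Filtered lines without blanks
--     """
--     return [line for line in lines if line.strip()]
--
-- def find_context_in_file(file_content, before_context, after_context):
--     """
--     TOO/APL/APLNN - Find context markers in file content (ignoring blank lines)
--     Args:
--         file_content (str): Full file content
--         before_context (list): Lines that should appear before target
--         after_context (list): Lines that should appear after target
--     Returns: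
--         tuple: (start_pos, end_pos) or (None, None) if not found
--     """
--     if not before_context or not after_context:
--         return None, None
--
--     # TOO/APL/APLOO - Normalize file content by removing blank lines for matching
--     file_lines = file_content.split('\n')
--     normalized_file_lines = normalize_context_lines(file_lines)
--
--     # TOO/APL/APLPP - Convert contexts to normalized strings
--     before_text_lines = normalize_context_lines(before_context)
--     after_text_lines = normalize_context_lines(after_context)
--
--     # TOO/APL/APLQQ - Find before context in normalized content
--     before_found = False
--     after_found = False
--     before_original_start = -1
--     after_original_end = -1
--
--     # TOO/APL/APLRR - Search for before context
--     for i in range(len(normalized_file_lines) - len(before_text_lines) + 1):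
--         match = True
--         for j, line in enumerate(before_text_lines):
--             if normalized_file_lines[i + j] != line:
--                 match = False
--                 break
--
--         if match:
--             # TOO/APL/APLSS - Find original position in file with blank lines
--             before_original_start = 0
--             normalized_count = 0
--             for orig_line in file_lines:
--                 if orig_line.strip():  # Non-blank line
--                     if normalized_count == i + len(before_text_lines):
--                         break
--                     normalized_count += 1
--                 before_original_start += len(orig_line) + 1  # +1 for newline
--             before_found = True
--             break
--
--     if not before_found:
--         return None, None
--
--     # TOO/APL/APLTT - Search for after context starting from after before context
--     search_start = i + len(before_text_lines)
--     for i in range(search_start, len(normalized_file_lines) - len(after_text_lines) + 1):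
--         match = True
--         for j, line in enumerate(after_text_lines):
--             if normalized_file_lines[i + j] != line:
--                 match = False
--                 break
--
--         if match:
--             # TOO/APL/APLUU - Find original position for after context
--             after_original_end = 0
--             normalized_count = 0
--             for orig_line in file_lines:
--                 if orig_line.strip():  # Non-blank line
--                     if normalized_count == i:
--                         break
--                     normalized_count += 1
--                 after_original_end += len(orig_line) + 1  # +1 for newline
--             after_found = True
--             break
--
--     if not after_found:
--         return None, None
--
--     return before_original_start, after_original_end
-- ===== SOURCE B (Python) =====
-- def _find_block(nfl, pat, start):
--     """First index k >= start with nfl[k:k+len(pat)] == pat, else None."""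
--     m = len(pat)
--     return next((k for k in range(start, len(nfl) - m + 1) if nfl[k:k+m] == pat), None)
--
-- def find_context_in_file(file_content, before_context, after_context):
--     if not before_context or not after_context:
--         return None, None
--     before = [l for l in before_context if l.strip()]
--     after = [l for l in after_context if l.strip()]
--     # One pass: non-blank lines together with the byte offset where each starts;
--     # a final sentinel offset marks the position just past the whole content.
--     nfl = []
--     offs = []
--     pos = 0
--     for line in file_content.split('\n'):
--         if line.strip():
--             nfl.append(line)
--             offs.append(pos)
--         pos += len(line) + 1
--     offs.append(pos)
--     i = _find_block(nfl, before, 0)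
--     if i is None:
--         return None, None
--     j = _find_block(nfl, after, i + len(before))
--     if j is None:
--         return None, None
--     return offs[i + len(before)], offs[j]
-- ===== Notes on version B (the rewrite author's own statement) =====
-- stated objective: alternative
-- what changed: B makes one pass over the file recording each non-blank line's byte offset in a table and searches with slice equality, instead of A's inner element-by-element match loops with a flag plus a full re-scan of all file lines to recover each byte position.
import Mathlib
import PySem

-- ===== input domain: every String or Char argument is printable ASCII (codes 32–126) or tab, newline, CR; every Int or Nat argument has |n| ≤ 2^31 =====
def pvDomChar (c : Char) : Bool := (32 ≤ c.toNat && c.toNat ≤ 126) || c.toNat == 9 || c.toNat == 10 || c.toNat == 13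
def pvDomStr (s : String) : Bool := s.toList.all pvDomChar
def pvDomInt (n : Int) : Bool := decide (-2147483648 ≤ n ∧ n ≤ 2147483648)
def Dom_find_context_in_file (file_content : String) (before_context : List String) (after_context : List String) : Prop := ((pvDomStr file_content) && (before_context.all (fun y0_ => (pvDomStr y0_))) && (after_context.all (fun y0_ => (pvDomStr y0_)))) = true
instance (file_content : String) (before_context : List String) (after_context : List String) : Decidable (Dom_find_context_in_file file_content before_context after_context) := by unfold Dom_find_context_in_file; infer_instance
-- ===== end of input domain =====

-- B replaces A's nested scan-and-rescan (inner line-by-line match loops with a flag, plus a full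
-- re-scan of the file to convert each normalized index back to a byte offset) by one pass that
-- records each non-blank line's byte offset in a table, then slice-equality searches; same values.

-- ===== PORT A =====
-- [line for line in lines if line.strip()]
def normalize_context_lines (lines : List String) : List String :=
  lines.filter (fun line => PySem.Str.strip line != "")

-- inner loop 'for j, line in enumerate(pat): if nfl[i+j] != line: match=False; break'
-- (indices i+j are in range whenever the caller's range guard holds, so getD is exact there)
def pvMatchLoopA (nfl : List String) (i : Nat) : List String → Nat → Bool
  | [], _ => true
  | line :: rest, j =>
    if nfl.getD (i + j) "" != line then false else pvMatchLoopA nfl i rest (j + 1)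

-- 'for i in range(i0, stop): if match: break' returning the breaking index
def pvSearchLoopA (nfl pat : List String) (i : Nat) (stop : Int) : Option Nat :=
  if h : (i : Int) < stop then
    if pvMatchLoopA nfl i pat 0 then some i else pvSearchLoopA nfl pat (i + 1) stop
  else none
termination_by (stop - i).toNat
decreasing_by omega

-- 'pos = 0; cnt = 0; for orig_line in file_lines: if orig_line.strip(): if cnt == target: break; cnt += 1
--  pos += len(orig_line) + 1' returning pos
def pvOffsetScanA (file_lines : List String) (target : Nat) (pos : Int) (cnt : Nat) : Int :=
  match file_lines with
  | [] => pos
  | l :: rest =>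
    if PySem.Str.strip l != "" then
      if cnt == target then pos
      else pvOffsetScanA rest target (pos + PySem.Str.len l + 1) (cnt + 1)
    else pvOffsetScanA rest target (pos + PySem.Str.len l + 1) cnt

def find_context_in_file (file_content : String) (before_context : List String) (after_context : List String) : Option Int × Option Int :=
  if before_context.isEmpty || after_context.isEmpty then (none, none)
  else
    -- file_content.split('\n'): the separator is the non-empty literal '\n', so split? is some
    let file_lines := (PySem.Str.split? file_content "\n").getD []
    let nfl := normalize_context_lines file_lines
    let before := normalize_context_lines before_context
    let after := normalize_context_lines after_context
    match pvSearchLoopA nfl before 0 ((nfl.length : Int) - before.length + 1) with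
    | none => (none, none)
    | some i =>
      let before_original_start := pvOffsetScanA file_lines (i + before.length) 0 0
      match pvSearchLoopA nfl after (i + before.length) ((nfl.length : Int) - after.length + 1) with
      | none => (none, none)
      | some j => (some before_original_start, some (pvOffsetScanA file_lines j 0 0))

-- ===== PORT B =====
-- single pass: for line in lines: if line.strip(): nfl.append(line); offs.append(pos); pos += len(line)+1
def pvBuildTablesB (lines : List String) : List String × List Int × Int :=
  lines.foldl
    (fun acc line =>
      let (nfl, offs, pos) := acc
      if PySem.Str.strip line != "" then
        (nfl ++ [line], offs ++ [pos], pos + PySem.Str.len line + 1)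
      else (nfl, offs, pos + PySem.Str.len line + 1))
    ([], [], 0)

-- next((k for k in range(start, len(nfl)-m+1) if nfl[k:k+m] == pat), None)
def pvFindBlockB (nfl pat : List String) (k : Nat) (stop : Int) : Option Nat :=
  if h : (k : Int) < stop then
    if PySem.List.slice nfl (some (k : Int)) (some ((k : Int) + (pat.length : Int))) == pat then some k
    else pvFindBlockB nfl pat (k + 1) stop
  else none
termination_by (stop - k).toNat
decreasing_by omega

def find_context_in_file_alt (file_content : String) (before_context : List String) (after_context : List String) : Option Int × Option Int :=
  if before_context.isEmpty || after_context.isEmpty then (none, none)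
  else
    let before := before_context.filter (fun l => PySem.Str.strip l != "")
    let after := after_context.filter (fun l => PySem.Str.strip l != "")
    let t := pvBuildTablesB ((PySem.Str.split? file_content "\n").getD [])
    let nfl := t.1
    let offs := t.2.1 ++ [t.2.2]
    match pvFindBlockB nfl before 0 ((nfl.length : Int) - before.length + 1) with
    | none => (none, none)
    | some i =>
      match pvFindBlockB nfl after (i + before.length) ((nfl.length : Int) - after.length + 1) with
      | none => (none, none)
      | some j => (some (offs.getD (i + before.length) 0), some (offs.getD j 0))

-- ===== PRECONDITION & SPEC =====
def Spec_find_context_in_file (file_content : String) (before_context : List String) (after_context : List String) (out : Option Int × Option Int) : Prop := out = find_context_in_file_alt file_content before_context after_context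
instance (file_content : String) (before_context : List String) (after_context : List String) (out : Option Int × Option Int) : Decidable (Spec_find_context_in_file file_content before_context after_context out) := by unfold Spec_find_context_in_file; infer_instance

-- ===== CLAIM (what is proved, stated in full; the proofs are below) =====
def Claim_equal_find_context_in_file : Prop := ∀ (file_content : String) (before_context : List String) (after_context : List String), Dom_find_context_in_file file_content before_context after_context → Spec_find_context_in_file file_content before_context after_context (find_context_in_file file_content before_context after_context)

-- ===== LEMMAS AND PROOFS =====

-- proof-only recursive characterizations of B's fold
def pvOffsList : List String → Int → List Int
  | [], _ => []
  | l :: rest, pos =>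
    if PySem.Str.strip l != "" then pos :: pvOffsList rest (pos + PySem.Str.len l + 1)
    else pvOffsList rest (pos + PySem.Str.len l + 1)

def pvTotLen (ls : List String) : Int := (ls.map (fun l => PySem.Str.len l + 1)).sum

theorem pvBuildTablesB_go (lines : List String) :
    ∀ (nfl0 : List String) (offs0 : List Int) (pos : Int),
    lines.foldl
      (fun acc line =>
        let (nfl, offs, p) := acc
        if PySem.Str.strip line != "" then
          (nfl ++ [line], offs ++ [p], p + PySem.Str.len line + 1)
        else (nfl, offs, p + PySem.Str.len line + 1))
      (nfl0, offs0, pos)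
    = (nfl0 ++ lines.filter (fun l => PySem.Str.strip l != ""),
       offs0 ++ pvOffsList lines pos, pos + pvTotLen lines) := by
  induction lines with
  | nil => intro nfl0 offs0 pos; simp [pvOffsList, pvTotLen]
  | cons l rest ih =>
    intro nfl0 offs0 pos
    simp only [List.foldl_cons]
    by_cases hb : PySem.Str.strip l = ""
    · rw [if_neg (by simp [hb]), ih]
      simp only [pvOffsList, pvTotLen, List.map_cons, List.sum_cons, List.filter_cons]
      rw [if_neg (by simp [hb]), if_neg (by simp [hb])]
      simp only [Prod.mk.injEq]
      refine ⟨trivial, trivial, by ring⟩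
    · rw [if_pos (by simp [hb]), ih]
      simp only [pvOffsList, pvTotLen, List.map_cons, List.sum_cons, List.filter_cons]
      rw [if_pos (by simp [hb]), if_pos (by simp [hb])]
      simp only [Prod.mk.injEq]
      refine ⟨by simp, by simp, by ring⟩

theorem pvBuildTablesB_eq (lines : List String) :
    pvBuildTablesB lines
      = (lines.filter (fun l => PySem.Str.strip l != ""), pvOffsList lines 0, pvTotLen lines) := by
  unfold pvBuildTablesB
  rw [pvBuildTablesB_go]
  simp

theorem pvMatchLoopA_iff (nfl : List String) (i : Nat) (pat : List String) :
    ∀ j, i + j + pat.length ≤ nfl.length →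
      (pvMatchLoopA nfl i pat j = true ↔ (nfl.drop (i + j)).take pat.length = pat) := by
  induction pat with
  | nil => intro j _; simp [pvMatchLoopA]
  | cons line rest ih =>
    intro j hle
    have hin : i + j < nfl.length := by simp at hle; omega
    rw [pvMatchLoopA]
    rw [List.getD_eq_getElem nfl "" hin]
    rw [List.drop_eq_getElem_cons hin]
    rw [List.length_cons, List.take_succ_cons]
    by_cases he : nfl[i + j] = line
    · rw [if_neg (by simp [he])]
      have h2 := ih (j + 1) (by simp at hle ⊢; omega)
      rw [show i + (j + 1) = i + j + 1 from by omega] at h2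
      rw [h2]
      simp [he]
    · rw [if_pos (by simp [he])]
      simp [he]

theorem pvSearch_eq_find (nfl pat : List String) (stop : Int)
    (hstop : stop ≤ (nfl.length : Int) - (pat.length : Int) + 1) :
    ∀ i, pvSearchLoopA nfl pat i stop = pvFindBlockB nfl pat i stop := by
  intro i
  by_cases h : (i : Int) < stop
  · rw [pvSearchLoopA, pvFindBlockB]
    simp only [dif_pos h]
    have hle : i + 0 + pat.length ≤ nfl.length := by
      have := hstop; push_cast at this h ⊢; omega
    have hm2 := pvMatchLoopA_iff nfl i pat 0 hle
    rw [Nat.add_zero] at hm2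
    rw [PySem.List.slice_natCast_add]
    by_cases hm : (nfl.drop i).take pat.length = pat
    · rw [if_pos (hm2.mpr hm), if_pos (by simp [hm])]
    · rw [if_neg (by rw [hm2]; exact hm), if_neg (by simp [hm])]
      exact pvSearch_eq_find nfl pat stop hstop (i + 1)
  · rw [pvSearchLoopA, pvFindBlockB]
    simp [h]
termination_by i => (stop - i).toNat
decreasing_by omega

theorem pvSearchLoopA_lt (nfl pat : List String) (stop : Int) :
    ∀ i r, pvSearchLoopA nfl pat i stop = some r → (r : Int) < stop := by
  intro i r
  by_cases h : (i : Int) < stop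
  · rw [pvSearchLoopA]
    simp only [dif_pos h]
    by_cases hm : pvMatchLoopA nfl i pat 0 = true
    · rw [if_pos hm]
      intro he; cases he; exact h
    · rw [if_neg hm]
      exact pvSearchLoopA_lt nfl pat stop (i + 1) r
  · rw [pvSearchLoopA]; simp [h]
termination_by i => (stop - i).toNat
decreasing_by omega

theorem pvOffsetScanA_eq (lines : List String) :
    ∀ (target : Nat) (pos : Int) (cnt : Nat), cnt ≤ target →
      target ≤ cnt + (lines.filter (fun l => PySem.Str.strip l != "")).length →
      pvOffsetScanA lines target pos cnt
        = (pvOffsList lines pos ++ [pos + pvTotLen lines]).getD (target - cnt) 0 := by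
  induction lines with
  | nil =>
    intro target pos cnt h1 h2
    simp only [List.filter_nil, List.length_nil, Nat.add_zero] at h2
    have : target = cnt := by omega
    subst this
    simp [pvOffsetScanA, pvOffsList, pvTotLen]
  | cons l rest ih =>
    intro target pos cnt h1 h2
    rw [pvOffsetScanA]
    simp only [List.filter_cons] at h2
    by_cases hb : PySem.Str.strip l = ""
    · rw [if_neg (by simp [hb])]
      rw [if_neg (by simp [hb])] at h2
      rw [ih target (pos + PySem.Str.len l + 1) cnt h1 h2]
      simp only [pvOffsList, pvTotLen, List.map_cons, List.sum_cons]
      rw [if_neg (by simp [hb])]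
      congr 3
      ring
    · rw [if_pos (by simp [hb])]
      rw [if_pos (by simp [hb]), List.length_cons] at h2
      by_cases hc : cnt = target
      · rw [if_pos (by simp [hc])]
        subst hc
        simp only [pvOffsList, pvTotLen]
        rw [if_pos (by simp [hb])]
        simp
      · rw [if_neg (by simp [hc])]
        rw [ih target (pos + PySem.Str.len l + 1) (cnt + 1) (by omega) (by omega)]
        simp only [pvOffsList, pvTotLen, List.map_cons, List.sum_cons]
        rw [if_pos (by simp [hb])]
        rw [show target - cnt = (target - (cnt + 1)) + 1 from by omega]
        simp only [List.cons_append, List.getD_cons_succ]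
        congr 3
        ring

-- ===== VERDICT (by name: the statement is the Claim_ definition above) =====
theorem find_context_in_file_spec : Claim_equal_find_context_in_file := by
  intro fc bc ac _
  unfold Spec_find_context_in_file find_context_in_file find_context_in_file_alt
  by_cases h0 : bc.isEmpty || ac.isEmpty
  · simp [h0]
  · simp only [h0, Bool.false_eq_true, if_neg, not_false_iff]
    rw [pvBuildTablesB_eq]
    set lines := (PySem.Str.split? fc "\n").getD [] with hlines
    set nfl := lines.filter (fun l => PySem.Str.strip l != "") with hnfl
    set before := bc.filter (fun l => PySem.Str.strip l != "") with hbefore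
    set after := ac.filter (fun l => PySem.Str.strip l != "") with hafter
    have hnorm : normalize_context_lines lines = nfl := rfl
    have hnb : normalize_context_lines bc = before := rfl
    have hna : normalize_context_lines ac = after := rfl
    rw [hnorm, hnb, hna]
    rw [pvSearch_eq_find nfl before ((nfl.length : Int) - before.length + 1) (le_refl _)]
    cases hfb : pvFindBlockB nfl before 0 ((nfl.length : Int) - before.length + 1) with
    | none => simp
    | some i =>
      simp only
      have hi : (i : Int) < (nfl.length : Int) - before.length + 1 := by
        apply pvSearchLoopA_lt nfl before _ 0 i
        rw [pvSearch_eq_find nfl before _ (le_refl _)]; exact hfb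
      have hib : i + before.length ≤ nfl.length := by push_cast at hi; omega
      rw [pvSearch_eq_find nfl after ((nfl.length : Int) - after.length + 1) (le_refl _)]
      cases hfa : pvFindBlockB nfl after (i + before.length) ((nfl.length : Int) - after.length + 1) with
      | none => simp
      | some j =>
        simp only
        have hj : (j : Int) < (nfl.length : Int) - after.length + 1 := by
          apply pvSearchLoopA_lt nfl after _ (i + before.length) j
          rw [pvSearch_eq_find nfl after _ (le_refl _)]; exact hfa
        have hjb : j ≤ nfl.length := by push_cast at hj; omega
        rw [pvOffsetScanA_eq lines (i + before.length) 0 0 (by omega) (by simpa [← hnfl] using hib)]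
        rw [pvOffsetScanA_eq lines j 0 0 (by omega) (by simpa [← hnfl] using hjb)]
        simp
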